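-- pv_equiv track=rewrite | github.com/pypi-data/pypi-mirror-403 | packages/secfn/secfn-0.0.1-py3-none-any.whl/secfn/access_control/rbac.py | _matches_permission
-- ===== SOURCE A (Python) =====
-- from typing import Dict, List, Optional
--
-- def _matches_permission(permissions: List[str], action: str) -> bool:
--     """Check if action matches any permission.
--
--     Args:
--         permissions: List of permission strings
--         action: Action to check (e.g., 'resource:read')
--
--     Returns:
--         True if matches
--     """
--     for permission in permissions:
--         # Handle wildcard permissions
--         if permission == "*:*":
--             return True
--
--         perm_parts = permission.split(":")
--         action_parts = action.split(":")
--
--         if len(perm_parts) != 2 or len(action_parts) != 2: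
--             continue
--
--         perm_resource, perm_action = perm_parts
--         action_resource, action_action = action_parts
--
--         # Check resource match
--         resource_match = perm_resource == "*" or perm_resource == action_resource
--
--         # Check action match
--         action_match = perm_action == "*" or perm_action == action_action
--
--         if resource_match and action_match:
--             return True
--
--     return False
-- ===== SOURCE B (Python) =====
-- from typing import List
--
-- def _matches_permission(permissions: List[str], action: str) -> bool:
--     """Check if action matches any permission (candidate-set formulation)."""
--     parts = action.split(":")
--     if len(parts) == 2:
--         res, act = parts
--         candidates = {res + ":" + act, "*:" + act, res + ":*", "*:*"}
--     else:
--         candidates = {"*:*"}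
--     return not candidates.isdisjoint(permissions)
-- ===== Notes on version B (the rewrite author's own statement) =====
-- stated objective: faster
-- what changed: B splits the action once and builds the four-element candidate set {res:act, *:act, res:*, *:*} (just {*:*} when the action does not split into two parts), then tests whether any permission is in that set, instead of A's per-permission re-splitting of both strings and field-by-field wildcard comparison.
import Mathlib
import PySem

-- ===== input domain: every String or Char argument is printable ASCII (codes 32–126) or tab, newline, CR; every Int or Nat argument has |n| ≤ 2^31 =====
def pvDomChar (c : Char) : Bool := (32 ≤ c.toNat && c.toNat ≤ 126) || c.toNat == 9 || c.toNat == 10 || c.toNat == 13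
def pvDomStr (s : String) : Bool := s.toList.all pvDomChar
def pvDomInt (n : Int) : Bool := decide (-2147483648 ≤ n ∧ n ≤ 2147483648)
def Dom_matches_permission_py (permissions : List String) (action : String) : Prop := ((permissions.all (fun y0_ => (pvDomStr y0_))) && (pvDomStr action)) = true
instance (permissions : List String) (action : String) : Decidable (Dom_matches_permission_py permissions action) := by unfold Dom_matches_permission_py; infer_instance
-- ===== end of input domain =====

-- B parses the action once into a candidate set of matching permission strings and tests set
-- membership, instead of A's per-permission splitting and field comparison (objective: simpler).

-- ===== PORT A =====
-- literal transliteration of A's loop: for each permission, early-return on "*:*",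
-- split both strings on ":", skip unless both have exactly 2 parts, compare fields.
def matches_permission_py (permissions : List String) (action : String) : Bool :=
  match permissions with
  | [] => false
  | permission :: rest =>
    if permission == "*:*" then true
    else
      -- permission.split(":") / action.split(":")
      match PySem.Chars.splitOn permission.toList [':'], PySem.Chars.splitOn action.toList [':'] with
      | [perm_resource, perm_action], [action_resource, action_action] =>
        if (perm_resource == ['*'] || perm_resource == action_resource)
            && (perm_action == ['*'] || perm_action == action_action) then true
        else matches_permission_py rest action
      | _, _ => matches_permission_py rest action   -- len(parts) != 2: continue

-- ===== PORT B =====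
-- transliteration of Source B: split the action once, build the candidate set, intersect.
-- Source B's 'if len(parts) == 2: res, act = parts' branch building the candidate set
def candSet (parts : List (List Char)) : PySem.Set (List Char) :=
  if parts.length = 2 then
    let res := parts.headD []
    let act := (parts.drop 1).headD []
    PySem.Set.ofList [res ++ ':' :: act, '*' :: ':' :: act, res ++ [':', '*'], ['*', ':', '*']]
  else PySem.Set.ofList [['*', ':', '*']]

def matches_permission_py_alt (permissions : List String) (action : String) : Bool :=
  let candidates := candSet (PySem.Chars.splitOn action.toList [':'])
  !(PySem.Set.isdisjoint candidates (permissions.map String.toList))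

-- ===== PRECONDITION & SPEC =====
def Spec_matches_permission_py (permissions : List String) (action : String) (out : Bool) : Prop := out = matches_permission_py_alt permissions action
instance (permissions : List String) (action : String) (out : Bool) : Decidable (Spec_matches_permission_py permissions action out) := by unfold Spec_matches_permission_py; infer_instance

-- ===== CLAIM (what is proved, stated in full; the proofs are below) =====
def Claim_equal_matches_permission_py : Prop := ∀ (permissions : List String) (action : String), Dom_matches_permission_py permissions action → Spec_matches_permission_py permissions action (matches_permission_py permissions action)

-- ===== LEMMAS AND PROOFS =====

-- PySem.Chars.splitOn with a single-character separator is Mathlib's List.splitOn.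
theorem splitOn_go_single (c : Char) (fuel : Nat) :
    ∀ (l cur : List Char) (acc : List (List Char)), l.length < fuel →
      PySem.Chars.splitOn.go [c] fuel l cur acc
        = acc.reverse ++ (l.splitOn c).modifyHead (cur.reverse ++ ·) := by
  induction fuel with
  | zero => intro l cur acc h; omega
  | succ fuel ih =>
    intro l cur acc h
    match l with
    | [] =>
      rw [PySem.Chars.splitOn.go.eq_def]
      simp [List.splitOn]
    | x :: rest =>
      rw [PySem.Chars.splitOn.go.eq_def]
      by_cases hx : x = c
      · subst hx
        have hpre : [x].isPrefixOf (x :: rest) = true := by simp [List.isPrefixOf]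
        simp only [hpre, if_true, List.length_cons]
        rw [show List.drop ([].length + 1) (x :: rest) = rest from rfl]
        rw [ih rest [] (cur.reverse :: acc) (by simp at h; omega)]
        have hne := List.splitOnP_ne_nil (fun a => a == x) rest
        simp only [List.splitOn, List.splitOnP_cons, beq_self_eq_true, if_true]
        cases hsp : rest.splitOnP (fun a => a == x) with
        | nil => exact absurd hsp hne
        | cons hd tl => simp
      · have hpre : [c].isPrefixOf (x :: rest) = false := by
          simp [List.isPrefixOf]; exact fun hcx => absurd hcx.symm hx
        simp only [hpre, Bool.false_eq_true, if_false]
        rw [ih rest (x :: cur) acc (by simp at h; omega)]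
        have hne := List.splitOnP_ne_nil (fun a => a == c) rest
        simp only [List.splitOn, List.splitOnP_cons, beq_iff_eq, hx, if_false]
        cases hsp : rest.splitOnP (fun a => a == c) with
        | nil => exact absurd hsp hne
        | cons hd tl => simp

-- PySem.Chars.splitOn with a one-character separator is Mathlib's List.splitOn
theorem chars_splitOn_single (s : List Char) (c : Char) :
    PySem.Chars.splitOn s [c] = s.splitOn c := by
  unfold PySem.Chars.splitOn
  rw [splitOn_go_single c (s.length + 1) s [] [] (by omega)]
  have hne := List.splitOnP_ne_nil (fun a => a == c) s
  simp only [List.splitOn] at *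
  cases hsp : s.splitOnP (fun a => a == c) with
  | nil => exact absurd hsp hne
  | cons hd tl => simp

-- no piece produced by splitOn contains the separator
theorem not_mem_splitOn (c : Char) (xs : List Char) : ∀ l ∈ xs.splitOn c, c ∉ l := by
  induction xs with
  | nil => simp [List.splitOn, List.splitOnP_nil]
  | cons x xs ih =>
    simp only [List.splitOn, List.splitOnP_cons] at *
    by_cases hx : x = c
    · simp only [hx, beq_self_eq_true, if_true]
      intro l hl
      rcases List.mem_cons.mp hl with h | h
      · simp [h]
      · exact ih l h
    · simp only [beq_iff_eq, hx, if_false]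
      have hne := List.splitOnP_ne_nil (fun a => a == c) xs
      cases hsp : xs.splitOnP (fun a => a == c) with
      | nil => exact absurd hsp hne
      | cons hd tl =>
        rw [hsp] at ih
        intro l hl
        rcases List.mem_cons.mp hl with h | h
        · subst h
          intro hc
          rcases List.mem_cons.mp hc with h' | h'
          · exact hx h'.symm
          · exact ih hd (List.mem_cons_self) h'
        · exact ih l (List.mem_cons_of_mem _ h)

-- splitting xs ++ ':' :: ys on ':' gives exactly [xs, ys] when neither part contains ':'
theorem splitOn_pair (c : Char) (xs ys : List Char) (hx : c ∉ xs) (hy : c ∉ ys) :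
    (xs ++ c :: ys).splitOn c = [xs, ys] := by
  simp only [List.splitOn]
  rw [List.splitOnP_first (p := fun x => x == c) (xs := xs)
      (h := by intro x hxm; simp; exact fun h => hx (h ▸ hxm)) c (by simp) ys]
  rw [List.splitOnP_eq_single (p := fun x => x == c) (xs := ys)
      (h := by intro y hym; simp; exact fun h => hy (h ▸ hym))]

-- the raw candidate list B builds (before deduplication)
def candList (action : String) : List (List Char) :=
  match action.toList.splitOn ':' with
  | [res, act] => [res ++ ':' :: act, '*' :: ':' :: act, res ++ [':', '*'], ['*', ':', '*']]
  | _ => [['*', ':', '*']]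

-- the test A's loop applies to one permission
def stepA (permission action : String) : Bool :=
  if permission == "*:*" then true
  else
    match PySem.Chars.splitOn permission.toList [':'], PySem.Chars.splitOn action.toList [':'] with
    | [pr, pa], [ar, aa] => (pr == ['*'] || pr == ar) && (pa == ['*'] || pa == aa)
    | _, _ => false

theorem matches_cons (p : String) (rest : List String) (action : String) :
    matches_permission_py (p :: rest) action
      = (stepA p action || matches_permission_py rest action) := by
  rw [matches_permission_py, stepA]
  by_cases hp : p == "*:*"
  · simp [hp]
  · simp only [hp, Bool.false_eq_true, if_false]
    rcases hP : PySem.Chars.splitOn p.toList [':'] with _ | ⟨pr, _ | ⟨pa, _ | ⟨q, prest⟩⟩⟩ <;>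
      rcases hA : PySem.Chars.splitOn action.toList [':'] with _ | ⟨ar, _ | ⟨aa, _ | ⟨w, arest⟩⟩⟩ <;>
      simp [beq_eq_decide]

-- the heart of the equivalence: A's per-permission test is membership in B's candidate list
theorem stepA_iff_mem (p action : String) :
    stepA p action = true ↔ p.toList ∈ candList action := by
  rw [stepA, candList, chars_splitOn_single, chars_splitOn_single]
  by_cases hp : p = "*:*"
  · subst hp
    simp only [beq_self_eq_true, if_true, true_iff]
    rw [show String.toList "*:*" = ['*', ':', '*'] from by decide]
    rcases hA : (action.toList.splitOn ':') with _ | ⟨ar, _ | ⟨aa, _ | ⟨w, arest⟩⟩⟩ <;> simp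
  · have hpb : (p == "*:*") = false := by simp [hp]
    simp only [hpb, Bool.false_eq_true, if_false]
    rcases hA : (action.toList.splitOn ':') with _ | ⟨ar, _ | ⟨aa, _ | ⟨w, arest⟩⟩⟩
    -- action does not split into exactly two parts: only "*:*" could match, and p ≠ "*:*"
    · rcases hP : (p.toList.splitOn ':') with _ | ⟨pr, _ | ⟨pa, _ | ⟨q, prest⟩⟩⟩ <;>
        · simp only [List.mem_singleton]
          constructor
          · intro h; simp at h
          · intro h; exact absurd (String.toList_inj.mp (by rw [h]; decide)) hp
    · rcases hP : (p.toList.splitOn ':') with _ | ⟨pr, _ | ⟨pa, _ | ⟨q, prest⟩⟩⟩ <;>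
        · simp only [List.mem_singleton]
          constructor
          · intro h; simp at h
          · intro h; exact absurd (String.toList_inj.mp (by rw [h]; decide)) hp
    · -- action splits as [ar, aa]
      have har : ':' ∉ ar := not_mem_splitOn ':' action.toList ar (by rw [hA]; simp)
      have haa : ':' ∉ aa := not_mem_splitOn ':' action.toList aa (by rw [hA]; simp)
      constructor
      · intro h
        rcases hP : (p.toList.splitOn ':') with _ | ⟨pr, _ | ⟨pa, _ | ⟨q, prest⟩⟩⟩ <;>
          rw [hP] at h <;> simp at h
        have hre : p.toList = pr ++ ':' :: pa := by
          have hint := List.intercalate_splitOn (xs := p.toList) ':'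
          rw [hP] at hint
          simpa [List.intercalate] using hint.symm
        rw [hre]
        rcases h with ⟨h1 | h1, h2 | h2⟩ <;> subst h1 <;> subst h2 <;> simp
      · intro h
        simp only [List.mem_cons, List.not_mem_nil, or_false] at h
        rcases h with h | h | h | h
        · rw [h, splitOn_pair ':' ar aa har haa]; simp
        · rw [h, show ('*' :: ':' :: aa) = ['*'] ++ ':' :: aa from rfl,
              splitOn_pair ':' ['*'] aa (by decide) haa]; simp
        · rw [h, show (ar ++ [':', '*']) = ar ++ ':' :: ['*'] from rfl,
              splitOn_pair ':' ar ['*'] har (by decide)]; simp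
        · rw [h, show (['*', ':', '*'] : List Char) = ['*'] ++ ':' :: ['*'] from rfl,
              splitOn_pair ':' ['*'] ['*'] (by decide) (by decide)]; simp
    · rcases hP : (p.toList.splitOn ':') with _ | ⟨pr, _ | ⟨pa, _ | ⟨q, prest⟩⟩⟩ <;>
        · simp only [List.mem_singleton]
          constructor
          · intro h; simp at h
          · intro h; exact absurd (String.toList_inj.mp (by rw [h]; decide)) hp

-- A's loop is an existential over the permissions
theorem matchesA_iff (permissions : List String) (action : String) :
    matches_permission_py permissions action = true
      ↔ ∃ p ∈ permissions, p.toList ∈ candList action := by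
  induction permissions with
  | nil => simp [matches_permission_py]
  | cons p rest ih =>
    rw [matches_cons]
    simp [ih, ← stepA_iff_mem]

-- B is the same existential
theorem matchesB_iff (permissions : List String) (action : String) :
    matches_permission_py_alt permissions action = true
      ↔ ∃ p ∈ permissions, p.toList ∈ candList action := by
  have hc : matches_permission_py_alt permissions action
      = !(PySem.Set.isdisjoint (PySem.Set.ofList (candList action))
            (permissions.map String.toList)) := by
    unfold matches_permission_py_alt candList
    rw [chars_splitOn_single]
    rcases hA : (action.toList.splitOn ':') with _ | ⟨ar, _ | ⟨aa, _ | ⟨w, arest⟩⟩⟩ <;>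
      simp [candSet]
  have hdis : (PySem.Set.isdisjoint (PySem.Set.ofList (candList action))
        (permissions.map String.toList) = true)
      ↔ ∀ p ∈ permissions, p.toList ∉ candList action := by
    rw [PySem.Set.isdisjoint_iff]
    constructor
    · intro h p hp hmem
      exact h p.toList ((PySem.Set.mem_ofList _ _).mpr hmem) (List.mem_map.mpr ⟨p, hp, rfl⟩)
    · intro h x hx hx2
      obtain ⟨p, hp, rfl⟩ := List.mem_map.mp hx2
      exact h p hp ((PySem.Set.mem_ofList _ _).mp hx)
  have hb : ∀ d : Bool, ((!d) = true ↔ ¬ (d = true)) := by intro d; cases d <;> simp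
  rw [hc, hb, hdis]
  push Not
  simp

-- ===== VERDICT (by name: the statement is the Claim_ definition above) =====
theorem matches_permission_py_spec : Claim_equal_matches_permission_py := by
  intro permissions action _
  unfold Spec_matches_permission_py
  rw [Bool.eq_iff_iff, matchesA_iff, matchesB_iff]
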